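-- pv_equiv track=rewrite | github.com/tomlatyn/TG | new/grafy.py | kontrola_slabe_souvislosti
-- ===== SOURCE A (Python) =====
-- def kontrola_slabe_souvislosti(uzly, sousedni_hrany):
--     from collections import deque
--
--     if not uzly:
--         return True
--
--     # Převod grafu na neorientovaný
--     neorientovane_hrany = {uzel: set() for uzel in uzly}
--     for uzel, sousede in sousedni_hrany.items():
--         for soused in sousede:
--             neorientovane_hrany[uzel].add(soused)
--             neorientovane_hrany[soused].add(uzel)
--
--     navstivene = set()
--     queue = deque([next(iter(uzly))])
--
--     while queue:
--         uzel = queue.popleft()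
--         if uzel not in navstivene:
--             navstivene.add(uzel)
--             queue.extend(neorientovane_hrany.get(uzel, []))
--
--     return navstivene == uzly
-- ===== SOURCE B (Python) =====
-- def kontrola_slabe_souvislosti(uzly, sousedni_hrany):
--     if not uzly:
--         return True
--     comp = {u: u for u in uzly}
--     for a, sousede in sousedni_hrany.items():
--         for b in sousede:
--             ra, rb = comp[a], comp[b]
--             if ra != rb:
--                 comp = {x: (ra if r == rb else r) for x, r in comp.items()}
--     return len(set(comp.values())) <= 1
-- ===== Notes on version B (the rewrite author's own statement) =====
-- stated objective: alternative
-- what changed: Replaces A's BFS (build an undirected adjacency dict of sets, then traverse with a deque from an arbitrary start node) by a single pass of union-find with merge-by-relabel: a component-label dict over uzly, each edge merges the two labels, and the graph is connected iff one label remains.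
import Mathlib
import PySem

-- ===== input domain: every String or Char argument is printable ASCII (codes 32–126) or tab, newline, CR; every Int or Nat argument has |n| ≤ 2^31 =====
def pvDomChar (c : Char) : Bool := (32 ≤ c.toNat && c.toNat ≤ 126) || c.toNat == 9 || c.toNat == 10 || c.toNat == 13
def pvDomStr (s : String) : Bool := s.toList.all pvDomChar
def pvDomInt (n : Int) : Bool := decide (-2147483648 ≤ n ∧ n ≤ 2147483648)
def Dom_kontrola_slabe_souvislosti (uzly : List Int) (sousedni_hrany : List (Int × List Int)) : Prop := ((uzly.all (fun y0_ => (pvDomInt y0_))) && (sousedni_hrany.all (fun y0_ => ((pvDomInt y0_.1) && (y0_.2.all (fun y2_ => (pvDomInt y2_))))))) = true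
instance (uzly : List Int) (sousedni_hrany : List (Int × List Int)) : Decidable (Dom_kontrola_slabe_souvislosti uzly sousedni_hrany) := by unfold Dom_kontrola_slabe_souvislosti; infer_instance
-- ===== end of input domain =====

-- B replaces A's BFS (adjacency dict + queue) by single-pass union-find with merge-by-relabel;
-- objective: alternative algorithm (same answer, no queue/adjacency structure), not claimed faster.

-- ===== PORT A =====
-- {uzel: set() for uzel in uzly} followed by the double .add loop; `modify` with default ∅
-- equals Python's `neorientovane_hrany[...].add(...)` whenever the key is present (Pre_ guarantees it;
-- where the key is absent Python raises KeyError and the input is outside Pre_).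
def pvBuildAdj (uzly : List Int) (sousedni_hrany : List (Int × List Int)) :
    PySem.Dict Int (PySem.Set Int) :=
  sousedni_hrany.foldl
    (fun d p => p.2.foldl
      (fun d soused =>
        (d.modify p.1 PySem.Set.empty (fun s => s.add soused)).modify soused PySem.Set.empty
          (fun s => s.add p.1)) d)
    (uzly.foldl (fun d u => d.insert u PySem.Set.empty) PySem.Dict.empty)

-- the `while queue:` loop; fuel only makes the recursion structural — on admitted inputs it is
-- provably never exhausted (Pre_-independent: see pvBfs_main below)
def pvBfs (d : PySem.Dict Int (PySem.Set Int)) :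
    Nat → PySem.Set Int → List Int → PySem.Set Int
  | 0, nav, _ => nav
  | _ + 1, nav, [] => nav
  | f + 1, nav, u :: q =>
    if PySem.Set.contains nav u then pvBfs d f nav q
    else pvBfs d f (nav.add u) (q ++ d.getD u PySem.Set.empty)

def kontrola_slabe_souvislosti (uzly : List Int) (sousedni_hrany : List (Int × List Int)) : Bool :=
  match uzly with
  | [] => true        -- if not uzly: return True
  | h :: _ =>
    let d := pvBuildAdj uzly sousedni_hrany
    let fuel := 1 + (d.keys.map (fun u => 1 + (d.getD u PySem.Set.empty).length)).sum
    -- queue = deque([next(iter(uzly))]); BFS; navstivene == uzly (set equality)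
    PySem.Set.equal (pvBfs d fuel PySem.Set.empty [h]) (PySem.Set.ofList uzly)

-- ===== PORT B =====
-- one union step: ra, rb = comp[a], comp[b]; if ra != rb: relabel every rb to ra.
-- comp[x] is ported as getD x x: Pre_ guarantees x is a key, so the default is never used.
def pvRelabelStep (c : PySem.Dict Int Int) (a b : Int) : PySem.Dict Int Int :=
  let ra := c.getD a a
  let rb := c.getD b b
  if ra = rb then c
  else PySem.Dict.mk (c.items.map (fun kv => (kv.1, if kv.2 = rb then ra else kv.2)))

def kontrola_slabe_souvislosti_alt (uzly : List Int) (sousedni_hrany : List (Int × List Int)) : Bool :=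
  match uzly with
  | [] => true        -- if not uzly: return True
  | _ :: _ =>
    let comp := sousedni_hrany.foldl
      (fun c p => p.2.foldl (fun c b => pvRelabelStep c p.1 b) c)
      (uzly.foldl (fun d u => d.insert u u) PySem.Dict.empty)
    decide ((PySem.Set.ofList comp.values).length ≤ 1)

-- ===== PRECONDITION & SPEC =====
-- Pre_ excludes exactly the inputs on which Python A raises KeyError: uzly nonempty and an edge
-- (inner-loop iteration) whose key or listed neighbour is not a member of uzly.  (B raises there
-- too; with uzly empty both return True before touching the edges, so those inputs are admitted.)
def Pre_kontrola_slabe_souvislosti (uzly : List Int) (sousedni_hrany : List (Int × List Int)) : Prop :=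
  uzly = [] ∨ ∀ p ∈ sousedni_hrany, ∀ v ∈ p.2, p.1 ∈ uzly ∧ v ∈ uzly
instance (uzly : List Int) (sousedni_hrany : List (Int × List Int)) : Decidable (Pre_kontrola_slabe_souvislosti uzly sousedni_hrany) := by unfold Pre_kontrola_slabe_souvislosti; infer_instance

def pvWitness_kontrola_slabe_souvislosti : List Int × (List (Int × List Int)) :=
  ([1, 2, 3], [(1, [2]), (3, [1, 1])])

def Spec_kontrola_slabe_souvislosti (uzly : List Int) (sousedni_hrany : List (Int × List Int)) (out : Bool) : Prop := out = kontrola_slabe_souvislosti_alt uzly sousedni_hrany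
instance (uzly : List Int) (sousedni_hrany : List (Int × List Int)) (out : Bool) : Decidable (Spec_kontrola_slabe_souvislosti uzly sousedni_hrany out) := by unfold Spec_kontrola_slabe_souvislosti; infer_instance

-- ===== CLAIM (what is proved, stated in full; the proofs are below) =====
def Claim_equal_kontrola_slabe_souvislosti : Prop := ∀ (uzly : List Int) (sousedni_hrany : List (Int × List Int)), Dom_kontrola_slabe_souvislosti uzly sousedni_hrany → Pre_kontrola_slabe_souvislosti uzly sousedni_hrany → Spec_kontrola_slabe_souvislosti uzly sousedni_hrany (kontrola_slabe_souvislosti uzly sousedni_hrany)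

-- ===== LEMMAS AND PROOFS =====

-- the flattened (directed) edge list both programs traverse, and connectivity generated by it
def pvEdges (sousedni_hrany : List (Int × List Int)) : List (Int × Int) :=
  sousedni_hrany.flatMap (fun p => p.2.map (fun v => (p.1, v)))

def pvConn (es : List (Int × Int)) (x y : Int) : Prop :=
  Relation.EqvGen (fun a b => (a, b) ∈ es) x y

-- both nested folds are the fold over the flattened edge list
theorem pv_foldl_pairs {α : Type} (step : α → Int × Int → α)
    (sh : List (Int × List Int)) (c0 : α) :
    sh.foldl (fun c p => p.2.foldl (fun c b => step c (p.1, b)) c) c0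
      = (pvEdges sh).foldl step c0 := by
  induction sh generalizing c0 with
  | nil => rfl
  | cons p t ih =>
    simp only [pvEdges, List.flatMap_cons, List.foldl_append, List.foldl_cons, List.foldl_map]
    exact ih _

-- ----- A side -----

theorem pv_mem_edges (sh : List (Int × List Int)) (a b : Int) :
    (a, b) ∈ pvEdges sh ↔ ∃ p ∈ sh, p.1 = a ∧ b ∈ p.2 := by
  simp only [pvEdges, List.mem_flatMap, List.mem_map]
  constructor
  · rintro ⟨p, hp, v, hv, h⟩
    exact ⟨p, hp, (Prod.mk.injEq _ _ _ _ ▸ h).1, by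
      obtain ⟨h1, h2⟩ := Prod.mk.injEq .. ▸ h; exact h2 ▸ hv⟩
  · rintro ⟨p, hp, rfl, hv⟩
    exact ⟨p, hp, b, hv, rfl⟩

-- one edge-processing step of A's build loop
def pvStep2 (d : PySem.Dict Int (PySem.Set Int)) (e : Int × Int) : PySem.Dict Int (PySem.Set Int) :=
  (d.modify e.1 PySem.Set.empty (fun s => s.add e.2)).modify e.2 PySem.Set.empty
    (fun s => s.add e.1)

theorem pvBuildAdj_eq (uzly : List Int) (sh : List (Int × List Int)) :
    pvBuildAdj uzly sh
      = (pvEdges sh).foldl pvStep2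
          (uzly.foldl (fun d u => d.insert u PySem.Set.empty) PySem.Dict.empty) :=
  pv_foldl_pairs pvStep2 sh _

theorem pv_d0_getD (uzly : List Int) (x : Int) :
    ∀ d : PySem.Dict Int (PySem.Set Int), (∀ z, d.getD z PySem.Set.empty = PySem.Set.empty) →
    (uzly.foldl (fun d u => d.insert u PySem.Set.empty) d).getD x PySem.Set.empty
      = PySem.Set.empty := by
  induction uzly with
  | nil => intro d hd; exact hd x
  | cons u t ih =>
    intro d hd
    refine ih _ (fun z => ?_)
    rw [PySem.Dict.getD_insert]
    split
    · rfl
    · exact hd z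

theorem pv_foldl_step2_getD (es : List (Int × Int)) (u y : Int) :
    ∀ d : PySem.Dict Int (PySem.Set Int),
    (y ∈ (es.foldl pvStep2 d).getD u PySem.Set.empty
      ↔ (u, y) ∈ es ∨ (y, u) ∈ es ∨ y ∈ d.getD u PySem.Set.empty) := by
  induction es with
  | nil => intro d; simp
  | cons e t ih =>
    intro d
    obtain ⟨a, b⟩ := e
    rw [List.foldl_cons, ih]
    have hstep : ∀ z, (pvStep2 d (a, b)).getD z PySem.Set.empty
        = if z = b then
            ((if b = a then (d.getD a PySem.Set.empty).add b else d.getD b PySem.Set.empty).add a)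
          else if z = a then (d.getD a PySem.Set.empty).add b
          else d.getD z PySem.Set.empty := by
      intro z
      simp only [pvStep2, PySem.Dict.getD_modify]
    rw [hstep u]
    simp only [List.mem_cons, Prod.mk.injEq]
    split_ifs with h1 h2 <;> (try simp only [PySem.Set.mem_add]) <;> aesop

theorem pv_foldl_step2_keys (es : List (Int × Int)) (k : Int) :
    ∀ d : PySem.Dict Int (PySem.Set Int),
    (k ∈ (es.foldl pvStep2 d).keys ↔ (∃ e ∈ es, k = e.1 ∨ k = e.2) ∨ k ∈ d.keys) := by
  induction es with
  | nil => intro d; simp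
  | cons e t ih =>
    intro d
    obtain ⟨a, b⟩ := e
    rw [List.foldl_cons, ih]
    have hk : ∀ k', k' ∈ (pvStep2 d (a, b)).keys ↔ k' = b ∨ k' = a ∨ k' ∈ d.keys := by
      intro k'
      simp only [pvStep2]
      rw [PySem.Dict.keys_modify, PySem.Dict.mem_keys_insert,
          PySem.Dict.keys_modify, PySem.Dict.mem_keys_insert]
    rw [hk k]
    simp only [List.mem_cons]
    constructor
    · rintro (⟨e, he, h⟩ | h | h | h)
      · exact Or.inl ⟨e, Or.inr he, h⟩
      · exact Or.inl ⟨(a, b), Or.inl rfl, Or.inr h⟩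
      · exact Or.inl ⟨(a, b), Or.inl rfl, Or.inl h⟩
      · exact Or.inr h
    · rintro (⟨e, he | he, h⟩ | h)
      · subst he; rcases h with h | h
        · exact Or.inr (Or.inr (Or.inl h))
        · exact Or.inr (Or.inl h)
      · exact Or.inl ⟨e, he, h⟩
      · exact Or.inr (Or.inr (Or.inr h))

-- adjacency-dict characterisation: after the build, y ∈ adj[u] iff (u,y) or (y,u) is an edge
theorem pv_adj_mem (uzly : List Int) (sh : List (Int × List Int)) (u y : Int) :
    y ∈ (pvBuildAdj uzly sh).getD u PySem.Set.empty
      ↔ (u, y) ∈ pvEdges sh ∨ (y, u) ∈ pvEdges sh := by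
  rw [pvBuildAdj_eq, pv_foldl_step2_getD]
  rw [pv_d0_getD uzly u PySem.Dict.empty (fun z => by simp [PySem.Dict.getD_empty])]
  simp [PySem.Set.empty]

-- every member of an adjacency set is a key of the dict
theorem pv_adj_sub_keys (uzly : List Int) (sh : List (Int × List Int)) (u y : Int) :
    y ∈ (pvBuildAdj uzly sh).getD u PySem.Set.empty → y ∈ (pvBuildAdj uzly sh).keys := by
  intro h
  rw [pvBuildAdj_eq, pv_foldl_step2_keys]
  rcases (pv_adj_mem uzly sh u y).1 h with h' | h'
  · exact Or.inl ⟨(u, y), h', Or.inr rfl⟩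
  · exact Or.inl ⟨(y, u), h', Or.inl rfl⟩

theorem pv_uzly_sub_keys (uzly : List Int) (sh : List (Int × List Int)) (u : Int) :
    u ∈ uzly → u ∈ (pvBuildAdj uzly sh).keys := by
  intro h
  rw [pvBuildAdj_eq, pv_foldl_step2_keys]
  refine Or.inr ?_
  rw [PySem.Dict.keys_foldl_insert]
  simp [PySem.Set.mem_update, PySem.Dict.keys_empty, h]

theorem pv_keys_nodup (uzly : List Int) (sh : List (Int × List Int)) :
    (pvBuildAdj uzly sh).keys.Nodup := by
  rw [pvBuildAdj_eq]
  have h0 : (uzly.foldl (fun (d : PySem.Dict Int (PySem.Set Int)) u =>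
      d.insert u PySem.Set.empty) PySem.Dict.empty).keys.Nodup := by
    exact PySem.Dict.nodup_keys_foldl_insert uzly (fun _ _ => PySem.Set.empty) PySem.Dict.empty
      PySem.Dict.nodup_keys_empty
  generalize (uzly.foldl (fun d u => d.insert u PySem.Set.empty) PySem.Dict.empty) = d at h0 ⊢
  induction pvEdges sh generalizing d with
  | nil => exact h0
  | cons e t ih =>
    refine ih _ ?_
    simp only [pvStep2]
    rw [PySem.Dict.keys_modify]
    refine PySem.Dict.nodup_keys_insert _ _ _ ?_
    rw [PySem.Dict.keys_modify]
    exact PySem.Dict.nodup_keys_insert _ _ _ h0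

-- BFS potential: pops still possible + (1 + pushes) for every unvisited key
def pvPhi (d : PySem.Dict Int (PySem.Set Int)) (v : PySem.Set Int) (q : List Int) : Nat :=
  q.length +
    ((d.keys.filter (fun u => !(PySem.Set.contains v u))).map
      (fun u => 1 + (d.getD u PySem.Set.empty).length)).sum

theorem pv_sum_filter_erase (l : List Int) (p : Int → Bool) (f : Int → Nat) (u : Int) :
    l.Nodup → u ∈ l → p u = true →
    ((l.filter p).map f).sum
      = f u + ((l.filter (fun x => p x && !(x == u))).map f).sum := by
  induction l with
  | nil => intro _ h; simp at h
  | cons a t ih =>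
    intro hnd hu hpu
    have hnd' := (List.nodup_cons.1 hnd).2
    rcases List.mem_cons.1 hu with rfl | hut
    · have hat : u ∉ t := (List.nodup_cons.1 hnd).1
      have hft : t.filter (fun x => p x && !(x == u)) = t.filter p := by
        apply List.filter_congr
        intro x hx
        have hxu : (x == u) = false := by
          simp only [beq_eq_false_iff_ne]
          rintro rfl
          exact hat hx
        simp [hxu]
      simp [hpu, hft]
    · have hne : (a == u) = false := by
        simp only [beq_eq_false_iff_ne]
        rintro rfl
        exact (List.nodup_cons.1 hnd).1 hut
      rw [List.filter_cons, List.filter_cons]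
      by_cases hpa : p a = true
      · rw [if_pos hpa, if_pos (by simp [hpa, hne])]
        simp only [List.map_cons, List.sum_cons, ih hnd' hut hpu]
        omega
      · have hpa' : p a = false := by rwa [Bool.not_eq_true] at hpa
        rw [if_neg (by simp [hpa']), if_neg (by simp [hpa'])]
        exact ih hnd' hut hpu

-- the BFS master lemma: with enough fuel the result contains v and q, is C-sound and adj-closed
theorem pvBfs_main (d : PySem.Dict Int (PySem.Set Int)) (hnd : d.keys.Nodup)
    (hself : ∀ u y, y ∈ d.getD u PySem.Set.empty → y ∈ d.keys)
    (C : Int → Prop) (hstep : ∀ x y, C x → y ∈ d.getD x PySem.Set.empty → C y) :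
    ∀ (f : Nat) (v : PySem.Set Int) (q : List Int),
      (∀ x ∈ q, x ∈ d.keys) → pvPhi d v q ≤ f →
      (∀ x ∈ v, C x) → (∀ x ∈ q, C x) →
      (∀ x ∈ v, ∀ y ∈ d.getD x PySem.Set.empty, y ∈ v ∨ y ∈ q) →
      (∀ x ∈ v, x ∈ pvBfs d f v q) ∧ (∀ x ∈ q, x ∈ pvBfs d f v q) ∧
      (∀ x ∈ pvBfs d f v q, C x) ∧
      (∀ x ∈ pvBfs d f v q, ∀ y ∈ d.getD x PySem.Set.empty, y ∈ pvBfs d f v q) := by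
  intro f
  induction f with
  | zero =>
    intro v q hqk hphi hCv hCq hinv
    have hq : q = [] := by
      cases q with
      | nil => rfl
      | cons a t => simp [pvPhi] at hphi
    subst hq
    simp only [pvBfs]
    exact ⟨fun x hx => hx, by simp, hCv,
      fun x hx y hy => (hinv x hx y hy).resolve_right (by simp)⟩
  | succ f ih =>
    intro v q hqk hphi hCv hCq hinv
    cases q with
    | nil =>
      simp only [pvBfs]
      exact ⟨fun x hx => hx, by simp, hCv,
        fun x hx y hy => (hinv x hx y hy).resolve_right (by simp)⟩
    | cons u t =>
      by_cases hvu : PySem.Set.contains v u = true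
      · have hmem : u ∈ v := (PySem.Set.contains_iff v u).1 hvu
        have hphi' : pvPhi d v t ≤ f := by
          simp only [pvPhi, List.length_cons] at hphi ⊢
          omega
        have hinv' : ∀ x ∈ v, ∀ y ∈ d.getD x PySem.Set.empty, y ∈ v ∨ y ∈ t := by
          intro x hx y hy
          rcases hinv x hx y hy with h | h
          · exact Or.inl h
          · rcases List.mem_cons.1 h with rfl | h'
            · exact Or.inl hmem
            · exact Or.inr h'
        have hrec := ih v t (fun x hx => hqk x (List.mem_cons_of_mem _ hx)) hphi' hCv
          (fun x hx => hCq x (List.mem_cons_of_mem _ hx)) hinv'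
        have hunf : pvBfs d (f + 1) v (u :: t) = pvBfs d f v t := by
          simp only [pvBfs, hvu, if_true]
        rw [hunf]
        refine ⟨hrec.1, fun x hx => ?_, hrec.2.2.1, hrec.2.2.2⟩
        rcases List.mem_cons.1 hx with rfl | hx'
        · exact hrec.1 x hmem
        · exact hrec.2.1 x hx'
      · have hmem : u ∉ v := fun hm => hvu ((PySem.Set.contains_iff v u).2 hm)
        have hvu0 : PySem.Set.contains v u = false := by
          rwa [Bool.not_eq_true] at hvu
        have huk : u ∈ d.keys := hqk u List.mem_cons_self
        have hCu : C u := hCq u List.mem_cons_self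
        have hcont : ∀ x, PySem.Set.contains (v.add u) x
            = (PySem.Set.contains v x || x == u) := by
          intro x
          rw [Bool.eq_iff_iff]
          simp [PySem.Set.mem_add]
        have hfil : d.keys.filter (fun x => !(PySem.Set.contains (v.add u) x))
            = d.keys.filter (fun x => (!(PySem.Set.contains v x)) && !(x == u)) := by
          apply List.filter_congr
          intro x _
          rw [hcont x, Bool.not_or]
        have hsum := pv_sum_filter_erase d.keys (fun x => !(PySem.Set.contains v x))
          (fun z => 1 + (d.getD z PySem.Set.empty).length) u hnd huk (by simp [hmem])
        beta_reduce at hsum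
        have hphi' : pvPhi d (v.add u) (t ++ d.getD u PySem.Set.empty) ≤ f := by
          simp only [pvPhi, List.length_cons, List.length_append] at hphi ⊢
          rw [hfil]
          rw [hsum] at hphi
          omega
        have hqk' : ∀ x ∈ t ++ d.getD u PySem.Set.empty, x ∈ d.keys := by
          intro x hx
          rcases List.mem_append.1 hx with h | h
          · exact hqk x (List.mem_cons_of_mem _ h)
          · exact hself u x h
        have hCv' : ∀ x ∈ v.add u, C x := by
          intro x hx
          rcases (PySem.Set.mem_add v u x).1 hx with h | rfl
          · exact hCv x h
          · exact hCu
        have hCq' : ∀ x ∈ t ++ d.getD u PySem.Set.empty, C x := by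
          intro x hx
          rcases List.mem_append.1 hx with h | h
          · exact hCq x (List.mem_cons_of_mem _ h)
          · exact hstep u x hCu h
        have hinv' : ∀ x ∈ v.add u, ∀ y ∈ d.getD x PySem.Set.empty,
            y ∈ v.add u ∨ y ∈ t ++ d.getD u PySem.Set.empty := by
          intro x hx y hy
          rcases (PySem.Set.mem_add v u x).1 hx with h | rfl
          · rcases hinv x h y hy with h' | h'
            · exact Or.inl ((PySem.Set.mem_add v u y).2 (Or.inl h'))
            · rcases List.mem_cons.1 h' with h'' | h''
              · exact Or.inl ((PySem.Set.mem_add v u y).2 (Or.inr h''))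
              · exact Or.inr (List.mem_append_left _ h'')
          · exact Or.inr (List.mem_append_right _ hy)
        have hrec := ih (v.add u) (t ++ d.getD u PySem.Set.empty) hqk' hphi' hCv' hCq' hinv'
        have hunf : pvBfs d (f + 1) v (u :: t)
            = pvBfs d f (v.add u) (t ++ d.getD u PySem.Set.empty) := by
          simp only [pvBfs, hvu0, Bool.false_eq_true, if_false]
        rw [hunf]
        refine ⟨fun x hx => hrec.1 x ((PySem.Set.mem_add v u x).2 (Or.inl hx)),
          fun x hx => ?_, hrec.2.2.1, hrec.2.2.2⟩
        rcases List.mem_cons.1 hx with hx' | hx'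
        · exact hrec.1 x ((PySem.Set.mem_add v u x).2 (Or.inr hx'))
        · exact hrec.2.1 x (List.mem_append_left _ hx')

-- connectivity respects the final visited set (it is closed under the symmetric adjacency)
theorem pv_conn_mem_iff (es : List (Int × Int)) (r : List Int)
    (hcl : ∀ x ∈ r, ∀ y, ((x, y) ∈ es ∨ (y, x) ∈ es) → y ∈ r) :
    ∀ x y, pvConn es x y → (x ∈ r ↔ y ∈ r) := by
  intro x y h
  induction h with
  | rel a b hab => exact ⟨fun ha => hcl a ha b (Or.inl hab), fun hb => hcl b hb a (Or.inr hab)⟩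
  | refl a => exact Iff.rfl
  | symm a b _ ih => exact ih.symm
  | trans a b c _ _ ih1 ih2 => exact ih1.trans ih2

-- under Pre_, everything connected to a node of uzly lies in uzly
theorem pv_conn_mem_uzly (uzly : List Int) (sh : List (Int × List Int))
    (hp : ∀ p ∈ sh, ∀ v ∈ p.2, p.1 ∈ uzly ∧ v ∈ uzly) :
    ∀ x y, pvConn (pvEdges sh) x y → (x ∈ uzly ↔ y ∈ uzly) := by
  intro x y h
  induction h with
  | rel a b hab =>
    obtain ⟨p, hp', h1, h2⟩ := (pv_mem_edges sh a b).1 hab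
    obtain ⟨ha, hb⟩ := hp p hp' b h2
    exact ⟨fun _ => hb, fun _ => h1 ▸ ha⟩
  | refl a => exact Iff.rfl
  | symm a b _ ih => exact ih.symm
  | trans a b c _ _ ih1 ih2 => exact ih1.trans ih2

-- A computes: every node of uzly is connected to the head
theorem pv_A_char (h : Int) (t : List Int) (sh : List (Int × List Int))
    (hp : ∀ p ∈ sh, ∀ v ∈ p.2, p.1 ∈ h :: t ∧ v ∈ h :: t) :
    (kontrola_slabe_souvislosti (h :: t) sh = true
      ↔ (∀ x ∈ h :: t, pvConn (pvEdges sh) h x)) := by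
  have hh : h ∈ h :: t := List.mem_cons_self
  simp only [kontrola_slabe_souvislosti]
  set d := pvBuildAdj (h :: t) sh with hd
  set fuel := 1 + (d.keys.map (fun u => 1 + (d.getD u PySem.Set.empty).length)).sum with hfuel
  have hphi : pvPhi d PySem.Set.empty [h] ≤ fuel := by
    have hfil : d.keys.filter (fun u => !(PySem.Set.contains PySem.Set.empty u)) = d.keys :=
      List.filter_eq_self.2 (fun a _ => by simp [PySem.Set.empty, PySem.Set.contains])
    simp only [pvPhi, hfil, List.length_cons, List.length_nil, hfuel]
    omega
  have hmain := pvBfs_main d (hd ▸ pv_keys_nodup (h :: t) sh)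
    (fun u y hy => hd ▸ pv_adj_sub_keys (h :: t) sh u y (hd ▸ hy))
    (pvConn (pvEdges sh) h)
    (fun x y hCx hy => by
      refine Relation.EqvGen.trans _ _ _ hCx ?_
      rcases (pv_adj_mem (h :: t) sh x y).1 (hd ▸ hy) with h' | h'
      · exact Relation.EqvGen.rel _ _ h'
      · exact Relation.EqvGen.symm _ _ (Relation.EqvGen.rel _ _ h'))
    fuel PySem.Set.empty [h]
    (by
      intro x hx
      rcases List.mem_singleton.1 hx with rfl
      exact hd ▸ pv_uzly_sub_keys _ sh _ List.mem_cons_self)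
    hphi
    (by intro x hx; simp [PySem.Set.empty] at hx)
    (by
      intro x hx
      rcases List.mem_singleton.1 hx with rfl
      exact Relation.EqvGen.refl x)
    (by intro x hx; simp [PySem.Set.empty] at hx)
  obtain ⟨-, hq, hsound, hclosed⟩ := hmain
  set r := pvBfs d fuel PySem.Set.empty [h] with hr
  have hhr : h ∈ r := hq h List.mem_cons_self
  have hcl : ∀ x ∈ r, ∀ y, ((x, y) ∈ pvEdges sh ∨ (y, x) ∈ pvEdges sh) → y ∈ r := by
    intro x hx y hy
    exact hclosed x hx y ((pv_adj_mem (h :: t) sh x y).2 hy)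
  rw [PySem.Set.equal_iff]
  constructor
  · intro hiff x hx
    exact hsound x ((hiff x).2 ((PySem.Set.mem_ofList _ x).2 hx))
  · intro hall x
    rw [PySem.Set.mem_ofList]
    constructor
    · intro hxr
      exact (pv_conn_mem_uzly (h :: t) sh hp h x (hsound x hxr)).1 hh
    · intro hxu
      exact (pv_conn_mem_iff (pvEdges sh) r hcl h x (hall x hxu)).1 hhr

-- ----- B side -----

-- adding one edge to the generators
theorem pv_conn_mono (es l : List (Int × Int)) :
    ∀ x y, pvConn es x y → pvConn (es ++ l) x y := by
  intro x y h
  induction h with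
  | rel a b hab => exact Relation.EqvGen.rel _ _ (List.mem_append_left _ hab)
  | refl a => exact Relation.EqvGen.refl a
  | symm a b _ ih => exact Relation.EqvGen.symm _ _ ih
  | trans a b c _ _ ih1 ih2 => exact Relation.EqvGen.trans _ _ _ ih1 ih2

theorem pv_conn_append_singleton (es : List (Int × Int)) (a b x y : Int) :
    pvConn (es ++ [(a, b)]) x y
      ↔ pvConn es x y ∨ (pvConn es x a ∧ pvConn es b y) ∨ (pvConn es x b ∧ pvConn es a y) := by
  constructor
  · intro hc
    induction hc with
    | rel u v huv =>
      rcases List.mem_append.1 huv with h' | h'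
      · exact Or.inl (Relation.EqvGen.rel _ _ h')
      · simp only [List.mem_singleton, Prod.mk.injEq] at h'
        obtain ⟨rfl, rfl⟩ := h'
        exact Or.inr (Or.inl ⟨Relation.EqvGen.refl _, Relation.EqvGen.refl _⟩)
    | refl u => exact Or.inl (Relation.EqvGen.refl u)
    | symm u v _ ih =>
      rcases ih with h1 | ⟨h1, h2⟩ | ⟨h1, h2⟩
      · exact Or.inl (Relation.EqvGen.symm _ _ h1)
      · exact Or.inr (Or.inr ⟨Relation.EqvGen.symm _ _ h2, Relation.EqvGen.symm _ _ h1⟩)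
      · exact Or.inr (Or.inl ⟨Relation.EqvGen.symm _ _ h2, Relation.EqvGen.symm _ _ h1⟩)
    | trans u v w _ _ ih1 ih2 =>
      rcases ih1 with h1 | ⟨h1, h2⟩ | ⟨h1, h2⟩ <;>
        rcases ih2 with h3 | ⟨h3, h4⟩ | ⟨h3, h4⟩
      · exact Or.inl (Relation.EqvGen.trans _ _ _ h1 h3)
      · exact Or.inr (Or.inl ⟨Relation.EqvGen.trans _ _ _ h1 h3, h4⟩)
      · exact Or.inr (Or.inr ⟨Relation.EqvGen.trans _ _ _ h1 h3, h4⟩)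
      · exact Or.inr (Or.inl ⟨h1, Relation.EqvGen.trans _ _ _ h2 h3⟩)
      · exact Or.inr (Or.inl ⟨h1, h4⟩)
      · exact Or.inl (Relation.EqvGen.trans _ _ _ h1 h4)
      · exact Or.inr (Or.inr ⟨h1, Relation.EqvGen.trans _ _ _ h2 h3⟩)
      · exact Or.inl (Relation.EqvGen.trans _ _ _ h1 h4)
      · exact Or.inr (Or.inr ⟨h1, h4⟩)
  · have hab : pvConn (es ++ [(a, b)]) a b :=
      Relation.EqvGen.rel _ _ (List.mem_append_right _ List.mem_cons_self)
    rintro (h1 | ⟨h1, h2⟩ | ⟨h1, h2⟩)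
    · exact pv_conn_mono es [(a, b)] x y h1
    · exact Relation.EqvGen.trans _ _ _ (pv_conn_mono es [(a, b)] x a h1)
        (Relation.EqvGen.trans _ _ _ hab (pv_conn_mono es [(a, b)] b y h2))
    · exact Relation.EqvGen.trans _ _ _ (pv_conn_mono es [(a, b)] x b h1)
        (Relation.EqvGen.trans _ _ _ (Relation.EqvGen.symm _ _ hab)
          (pv_conn_mono es [(a, b)] a y h2))

theorem pv_conn_nil (x y : Int) : pvConn [] x y ↔ x = y := by
  constructor
  · intro hc
    induction hc with
    | rel a b hab => simp at hab
    | refl a => rfl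
    | symm a b _ ih => exact ih.symm
    | trans a b c _ _ ih1 ih2 => exact ih1.trans ih2
  · rintro rfl
    exact Relation.EqvGen.refl x

theorem pvRelabelStep_eq (c : PySem.Dict Int Int) (a b : Int) :
    pvRelabelStep c a b
      = if c.getD a a = c.getD b b then c
        else PySem.Dict.mk (c.items.map
          (fun kv => (kv.1, if kv.2 = c.getD b b then c.getD a a else kv.2))) := rfl

-- the component map after the initial dict comprehension
theorem pv_comp0_getD_aux (uzly : List Int) (x : Int) :
    ∀ d : PySem.Dict Int Int,
    (uzly.foldl (fun d u => d.insert u u) d).getD x x = if x ∈ uzly then x else d.getD x x := by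
  induction uzly with
  | nil => intro d; simp
  | cons u t ih =>
    intro d
    rw [List.foldl_cons, ih, PySem.Dict.getD_insert]
    by_cases hxt : x ∈ t <;> by_cases hxu : x = u <;> simp [hxt, hxu]

theorem pv_comp0_getD (uzly : List Int) (x : Int) :
    (uzly.foldl (fun d u => d.insert u u) PySem.Dict.empty).getD x x = x := by
  rw [pv_comp0_getD_aux]
  split <;> simp [PySem.Dict.getD_empty]

-- relabel rewrites every stored value through one function
theorem pv_get?_mapval (l : List (Int × Int)) (f : Int → Int) (x : Int) :
    (PySem.Dict.mk (l.map (fun kv => (kv.1, f kv.2)))).get? x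
      = ((PySem.Dict.mk l).get? x).map f := by
  induction l with
  | nil => rfl
  | cons kv t ih =>
    obtain ⟨k, v⟩ := kv
    simp only [List.map_cons, PySem.Dict.get?_mk_cons]
    split <;> simp [*]

-- B's invariant: component labels agree exactly on connected (so far) nodes of uzly
theorem pv_B_invariant (uzly : List Int) (es : List (Int × Int))
    (hes : ∀ e ∈ es, e.1 ∈ uzly ∧ e.2 ∈ uzly) :
    (es.foldl (fun c e => pvRelabelStep c e.1 e.2)
        (uzly.foldl (fun d u => d.insert u u) PySem.Dict.empty)).keys = PySem.Set.ofList uzly ∧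
    (∀ x ∈ uzly, ∀ y ∈ uzly,
      ((es.foldl (fun c e => pvRelabelStep c e.1 e.2)
          (uzly.foldl (fun d u => d.insert u u) PySem.Dict.empty)).getD x x
        = (es.foldl (fun c e => pvRelabelStep c e.1 e.2)
          (uzly.foldl (fun d u => d.insert u u) PySem.Dict.empty)).getD y y
        ↔ pvConn es x y)) := by
  have hkeys0 : (uzly.foldl (fun (d : PySem.Dict Int Int) u => d.insert u u)
      PySem.Dict.empty).keys = PySem.Set.ofList uzly := by
    have h1 := PySem.Dict.keys_foldl_insert (ν := Int) uzly (fun _ x => x) PySem.Dict.empty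
    simp only [PySem.Dict.keys_empty] at h1
    have h2 : PySem.Set.update ([] : PySem.Set Int) uzly = PySem.Set.ofList uzly := by
      rw [PySem.Set.ofList_eq_foldl]
      rfl
    exact h1.trans h2
  revert hes
  induction es using List.reverseRecOn with
  | nil =>
    intro _
    simp only [List.foldl_nil]
    refine ⟨hkeys0, fun x _ y _ => ?_⟩
    rw [pv_comp0_getD, pv_comp0_getD, pv_conn_nil]
  | append_singleton es e ih =>
    intro hes
    obtain ⟨a, b⟩ := e
    have hes' : ∀ e' ∈ es, e'.1 ∈ uzly ∧ e'.2 ∈ uzly :=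
      fun e' he' => hes e' (List.mem_append_left _ he')
    obtain ⟨ha, hb⟩ := hes (a, b) (List.mem_append_right _ List.mem_cons_self)
    obtain ⟨ihk, ihg⟩ := ih hes'
    rw [List.foldl_append]
    set c := es.foldl (fun c e => pvRelabelStep c e.1 e.2)
      (uzly.foldl (fun d u => d.insert u u) PySem.Dict.empty) with hc
    simp only [List.foldl_cons, List.foldl_nil]
    have hsymm : ∀ p q, pvConn es p q → pvConn es q p :=
      fun p q hpq => Relation.EqvGen.symm _ _ hpq
    by_cases hr : c.getD a a = c.getD b b
    · rw [pvRelabelStep_eq, if_pos hr]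
      have hConnab : pvConn es a b := (ihg a ha b hb).1 hr
      refine ⟨ihk, fun x hx y hy => ?_⟩
      rw [ihg x hx y hy, pv_conn_append_singleton]
      constructor
      · exact Or.inl
      · rintro (h1 | ⟨h1, h2⟩ | ⟨h1, h2⟩)
        · exact h1
        · exact Relation.EqvGen.trans _ _ _ h1 (Relation.EqvGen.trans _ _ _ hConnab h2)
        · exact Relation.EqvGen.trans _ _ _ h1
            (Relation.EqvGen.trans _ _ _ (hsymm a b hConnab) h2)
    · rw [pvRelabelStep_eq, if_neg hr]
      set c' := PySem.Dict.mk (c.items.map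
        (fun kv => (kv.1, if kv.2 = c.getD b b then c.getD a a else kv.2))) with hc'
      have hmk : PySem.Dict.mk c.items = c := PySem.Dict.ext rfl
      have hkeys' : c'.keys = c.keys := by
        rw [hc']
        simp only [PySem.Dict.keys, List.map_map]
        rfl
      have hg' : ∀ x ∈ uzly,
          c'.getD x x = if c.getD x x = c.getD b b then c.getD a a else c.getD x x := by
        intro x hx
        have hxk : x ∈ c.keys := by
          rw [ihk]
          exact (PySem.Set.mem_ofList uzly x).2 hx
        obtain ⟨w, hw⟩ : ∃ w, c.get? x = some w := by
          cases hcw : c.get? x with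
          | none => exact absurd hxk ((PySem.Dict.get?_eq_none_iff_not_mem_keys c x).1 hcw)
          | some w => exact ⟨w, rfl⟩
        have hmv : (PySem.Dict.mk (c.items.map
              (fun kv => (kv.1, if kv.2 = c.getD b b then c.getD a a else kv.2)))).get? x
            = ((PySem.Dict.mk c.items).get? x).map
              (fun r => if r = c.getD b b then c.getD a a else r) :=
          pv_get?_mapval c.items (fun r => if r = c.getD b b then c.getD a a else r) x
        rw [hc', PySem.Dict.getD_eq_get?_getD, hmv, hmk, hw,
          PySem.Dict.getD_of_get?_eq_some c x hw]
        rfl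
      refine ⟨hkeys'.trans ihk, fun x hx y hy => ?_⟩
      rw [hg' x hx, hg' y hy, pv_conn_append_singleton]
      rw [show pvConn es b y ↔ pvConn es y b from ⟨hsymm b y, hsymm y b⟩,
        show pvConn es a y ↔ pvConn es y a from ⟨hsymm a y, hsymm y a⟩,
        ← ihg x hx y hy, ← ihg x hx a ha, ← ihg y hy b hb, ← ihg x hx b hb, ← ihg y hy a ha]
      split_ifs <;> constructor <;> intro hyp <;> omega

-- a set has at most one element iff the source list is pairwise equal
theorem pv_ofList_len_le_one (vs : List Int) :
    (PySem.Set.ofList vs).length ≤ 1 ↔ ∀ a ∈ vs, ∀ b ∈ vs, a = b := by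
  constructor
  · intro hlen a ha b hb
    have ha' : a ∈ PySem.Set.ofList vs := (PySem.Set.mem_ofList vs a).2 ha
    have hb' : b ∈ PySem.Set.ofList vs := (PySem.Set.mem_ofList vs b).2 hb
    match hvs : PySem.Set.ofList vs, hlen with
    | [], _ => rw [hvs] at ha'; simp at ha'
    | [x], _ =>
      rw [hvs] at ha' hb'
      simp only [List.mem_singleton] at ha' hb'
      rw [ha', hb']
  · intro hall
    match vs with
    | [] => simp [PySem.Set.ofList_nil]
    | v :: t =>
      rw [PySem.Set.ofList_cons]
      have : (PySem.Set.ofList t).discard v = [] := by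
        rw [List.eq_nil_iff_forall_not_mem]
        intro x hx
        obtain ⟨hx1, hx2⟩ := (PySem.Set.mem_discard _ v x).1 hx
        exact hx2 (hall x (List.mem_cons_of_mem v ((PySem.Set.mem_ofList t x).1 hx1))
          v List.mem_cons_self)
      rw [this]
      simp

theorem pv_getD_key (c : PySem.Dict Int Int) (k : Int) (hk : k ∈ c.keys) (d1 d2 : Int) :
    c.getD k d1 = c.getD k d2 := by
  cases hc : c.get? k with
  | none => exact absurd hk ((PySem.Dict.get?_eq_none_iff_not_mem_keys c k).1 hc)
  | some w =>
    rw [PySem.Dict.getD_of_get?_eq_some c d1 hc, PySem.Dict.getD_of_get?_eq_some c d2 hc]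

-- B computes: all nodes of uzly are pairwise connected
theorem pv_B_char (h : Int) (t : List Int) (sh : List (Int × List Int))
    (hp : ∀ p ∈ sh, ∀ v ∈ p.2, p.1 ∈ h :: t ∧ v ∈ h :: t) :
    (kontrola_slabe_souvislosti_alt (h :: t) sh = true
      ↔ (∀ x ∈ h :: t, ∀ y ∈ h :: t, pvConn (pvEdges sh) x y)) := by
  have hes : ∀ e ∈ pvEdges sh, e.1 ∈ h :: t ∧ e.2 ∈ h :: t := by
    intro e he
    obtain ⟨a, b⟩ := e
    obtain ⟨p, hp', h1, h2⟩ := (pv_mem_edges sh a b).1 he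
    obtain ⟨ha, hb⟩ := hp p hp' b h2
    exact ⟨h1 ▸ ha, hb⟩
  obtain ⟨hkeys, hinv⟩ := pv_B_invariant (h :: t) (pvEdges sh) hes
  simp only [kontrola_slabe_souvislosti_alt]
  have hport : ((h :: t).foldl (fun (d : PySem.Dict Int Int) u => d.insert u u)
        PySem.Dict.empty |> fun c0 =>
        sh.foldl (fun c p => p.2.foldl (fun c b => pvRelabelStep c p.1 b) c) c0)
      = (pvEdges sh).foldl (fun c e => pvRelabelStep c e.1 e.2)
        ((h :: t).foldl (fun d u => d.insert u u) PySem.Dict.empty) := by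
    exact pv_foldl_pairs (fun c e => pvRelabelStep c e.1 e.2) sh _
  rw [show (sh.foldl (fun c p => p.2.foldl (fun c b => pvRelabelStep c p.1 b) c)
      ((h :: t).foldl (fun d u => d.insert u u) PySem.Dict.empty))
      = (pvEdges sh).foldl (fun c e => pvRelabelStep c e.1 e.2)
        ((h :: t).foldl (fun d u => d.insert u u) PySem.Dict.empty) from hport]
  set comp := (pvEdges sh).foldl (fun c e => pvRelabelStep c e.1 e.2)
    ((h :: t).foldl (fun d u => d.insert u u) PySem.Dict.empty) with hcomp
  have hnd : comp.keys.Nodup := by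
    rw [hkeys]
    exact PySem.Set.nodup_ofList _
  rw [decide_eq_true_eq, pv_ofList_len_le_one, PySem.Dict.values_eq_map_keys comp hnd 0]
  constructor
  · intro hall x hx y hy
    have hxk : x ∈ comp.keys := by
      rw [hkeys]; exact (PySem.Set.mem_ofList _ x).2 hx
    have hyk : y ∈ comp.keys := by
      rw [hkeys]; exact (PySem.Set.mem_ofList _ y).2 hy
    refine (hinv x hx y hy).1 ?_
    have h1 : comp.getD x 0 = comp.getD y 0 :=
      hall _ (List.mem_map.2 ⟨x, hxk, rfl⟩) _ (List.mem_map.2 ⟨y, hyk, rfl⟩)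
    rw [pv_getD_key comp x hxk x 0, pv_getD_key comp y hyk y 0]
    exact h1
  · intro hconn v1 hv1 v2 hv2
    obtain ⟨x, hxk, rfl⟩ := List.mem_map.1 hv1
    obtain ⟨y, hyk, rfl⟩ := List.mem_map.1 hv2
    have hx : x ∈ h :: t := (PySem.Set.mem_ofList _ x).1 (hkeys ▸ hxk)
    have hy : y ∈ h :: t := (PySem.Set.mem_ofList _ y).1 (hkeys ▸ hyk)
    have hxy : comp.getD x x = comp.getD y y := (hinv x hx y hy).2 (hconn x hx y hy)
    rw [pv_getD_key comp x hxk 0 x, pv_getD_key comp y hyk 0 y]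
    exact hxy

-- ===== VERDICT (by name: the statement is the Claim_ definition above) =====
theorem kontrola_slabe_souvislosti_spec : Claim_equal_kontrola_slabe_souvislosti := by
  intro uzly sh _ hp
  unfold Spec_kontrola_slabe_souvislosti
  match uzly with
  | [] => rfl
  | h :: t =>
    have hp' : ∀ p ∈ sh, ∀ v ∈ p.2, p.1 ∈ h :: t ∧ v ∈ h :: t :=
      hp.resolve_left (by simp)
    have hh : h ∈ h :: t := List.mem_cons_self
    rw [Bool.eq_iff_iff, pv_A_char h t sh hp', pv_B_char h t sh hp']
    constructor
    · intro hA x hx y hy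
      exact Relation.EqvGen.trans _ _ _ (Relation.EqvGen.symm _ _ (hA x hx)) (hA y hy)
    · intro hB x hx
      exact hB h hh x hx
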